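-- pv_equiv track=rewrite | github.com/xiaofanc/leetcode | 0189-rotate-array.py | rotate4
-- ===== SOURCE A (Python) =====
-- def rotate4(nums, k):
--     # brute force
--     n = len(nums)
--     k = k % n
--     for i in range(k):
--         previous = nums[-1]
--         # for each k, rotate the whole nums
--         for j in range(n):
--             nums[j], previous = previous, nums[j]
--     return nums
-- ===== SOURCE B (Python) =====
-- def rotate4(nums, k):
--     # slice-based rotation: O(n) instead of A's O(n*k); mutates nums in place like A
--     n = len(nums)
--     k %= n
--     nums[:] = nums[n - k:] + nums[:n - k]
--     return nums
-- ===== Notes on version B (the rewrite author's own statement) =====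
-- stated objective: faster
-- what changed: Replaces A's k repeated one-step whole-array rotations (nested loops) with a single slice concatenation nums[n-k:]+nums[:n-k].
import Mathlib
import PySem

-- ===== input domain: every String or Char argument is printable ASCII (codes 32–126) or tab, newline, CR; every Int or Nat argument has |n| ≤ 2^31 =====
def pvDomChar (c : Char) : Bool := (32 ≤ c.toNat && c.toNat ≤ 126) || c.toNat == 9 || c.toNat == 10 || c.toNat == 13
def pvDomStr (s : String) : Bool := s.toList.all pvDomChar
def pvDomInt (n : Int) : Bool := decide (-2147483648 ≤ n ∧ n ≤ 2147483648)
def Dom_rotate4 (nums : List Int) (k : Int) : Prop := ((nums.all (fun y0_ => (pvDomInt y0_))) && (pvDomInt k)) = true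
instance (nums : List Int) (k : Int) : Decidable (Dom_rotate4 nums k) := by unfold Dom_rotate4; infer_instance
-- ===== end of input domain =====

-- B rotates by one slice concatenation instead of A's k repeated one-step rotations; like A (which
-- mutates nums in place and returns it), only the RETURN value is compared here (B mutates too).

-- ===== PORT A =====
-- one inner-loop step:  nums[j], previous = previous, nums[j]   (simultaneous assignment; j always in range)
def rotInnerStep (st : List Int × Int) (j : Int) : List Int × Int :=
  (st.1.set j.toNat st.2, (PySem.List.pyGet? st.1 j).getD 0)

-- one outer iteration: previous = nums[-1]; then 'for j in range(n)'
def rotOuterStep (n : Int) (l : List Int) (_i : Int) : List Int :=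
  ((PySem.List.pyRange 0 n 1).foldl rotInnerStep (l, (PySem.List.pyGet? l (-1)).getD 0)).1

-- n = len(nums); k = k % n; for i in range(k): <rotate whole nums by one>; return nums
def rotate4 (nums : List Int) (k : Int) : List Int :=
  (PySem.List.pyRange 0 (PySem.Int.mod k (nums.length : Int)) 1).foldl
    (rotOuterStep (nums.length : Int)) nums

-- ===== PORT B =====
-- n = len(nums); k %= n; nums[:] = nums[n-k:] + nums[:n-k]; return nums
def rotate4_alt (nums : List Int) (k : Int) : List Int :=
  PySem.List.slice nums (some ((nums.length : Int) - PySem.Int.mod k (nums.length : Int))) none ++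
  PySem.List.slice nums none (some ((nums.length : Int) - PySem.Int.mod k (nums.length : Int)))

-- ===== PRECONDITION & SPEC =====
-- Pre_ excludes only the empty list, where 'k % len(nums)' raises ZeroDivisionError in A (and in B).
def Pre_rotate4 (nums : List Int) (k : Int) : Prop := nums ≠ []
instance (nums : List Int) (k : Int) : Decidable (Pre_rotate4 nums k) := by unfold Pre_rotate4; infer_instance
def pvWitness_rotate4 : List Int × Int := ([1, 2, 3], 1)

def Spec_rotate4 (nums : List Int) (k : Int) (out : List Int) : Prop := out = rotate4_alt nums k
instance (nums : List Int) (k : Int) (out : List Int) : Decidable (Spec_rotate4 nums k out) := by unfold Spec_rotate4; infer_instance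

-- ===== CLAIM (what is proved, stated in full; the proofs are below) =====
def Claim_equal_rotate4 : Prop := ∀ (nums : List Int) (k : Int), Dom_rotate4 nums k → Pre_rotate4 nums k → Spec_rotate4 nums k (rotate4 nums k)

-- ===== LEMMAS AND PROOFS =====

-- nums[-1] on a nonempty list is its last element
theorem pyGet_neg_one (l : List Int) (h : l ≠ []) : PySem.List.pyGet? l (-1) = l.getLast? := by
  have hl : 0 < l.length := List.length_pos_iff.mpr h
  simp [PySem.List.pyGet?, PySem.List.pyIdx?, hl, Nat.one_le_iff_ne_zero.mpr hl.ne',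
    List.getLast?_eq_getElem?]

-- invariant of A's inner j-loop after m steps (1 ≤ m ≤ |xs|)
theorem inner_inv (xs : List Int) (p : Int) (m : Nat) (h1 : 1 ≤ m) (h2 : m ≤ xs.length) :
    (PySem.List.pyRange 0 (m : Int) 1).foldl rotInnerStep (xs, p)
      = (p :: (xs.take (m - 1) ++ xs.drop m), xs.getD (m - 1) 0) := by
  induction m with
  | zero => omega
  | succ m ih =>
    by_cases hm : m = 0
    · subst hm
      obtain ⟨a, t, rfl⟩ : ∃ a t, xs = a :: t := by
        cases xs with
        | nil => simp at h2
        | cons a t => exact ⟨a, t, rfl⟩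
      have h01 : PySem.List.pyRange 0 ((0 + 1 : Nat) : Int) 1 = [0] := rfl
      rw [h01]
      simp [rotInnerStep, PySem.List.pyGet?, PySem.List.pyIdx?]
    · obtain ⟨mm, rfl⟩ : ∃ mm, m = mm + 1 := ⟨m - 1, by omega⟩
      have h1' : 1 ≤ mm + 1 := by omega
      have h2' : mm + 1 ≤ xs.length := by omega
      have hmlt : mm + 1 < xs.length := by omega
      have hsplit : PySem.List.pyRange 0 (((mm + 1) : Nat) + 1 : Int) 1
          = PySem.List.pyRange 0 ((mm + 1 : Nat) : Int) 1 ++ [((mm + 1 : Nat) : Int)] :=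
        PySem.List.pyRange_one_succ_right (Int.natCast_nonneg _)
      have hc : ((mm + 1 + 1 : Nat) : Int) = (((mm + 1) : Nat) : Int) + 1 := by push_cast; ring
      rw [hc, hsplit, List.foldl_append, ih h1' h2']
      have hpre : (p :: xs.take (mm + 1 - 1)).length = mm + 1 := by
        simp [List.length_take]; omega
      have hdrop : xs.drop (mm + 1) = xs[mm + 1] :: xs.drop (mm + 1 + 1) :=
        List.drop_eq_getElem_cons hmlt
      have htake : xs.take (mm + 1) = xs.take mm ++ [xs[mm]] := by
        rw [List.take_add_one]
        simp [List.getElem?_eq_getElem (by omega : mm < xs.length)]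
      simp only [List.foldl_cons, List.foldl_nil, rotInnerStep, Prod.mk.injEq]
      refine ⟨?_, ?_⟩
      · -- the list after setting index mm+1
        have hsp : (p :: (xs.take (mm + 1 - 1) ++ xs.drop (mm + 1)))
            = (p :: xs.take (mm + 1 - 1)) ++ xs.drop (mm + 1) := by simp
        simp only [Int.toNat_natCast]
        rw [hsp, List.set_append_right (mm + 1) _ (by rw [hpre]), hpre, Nat.sub_self, hdrop]
        simp only [List.set_cons_zero]
        have hget : xs.getD (mm + 1 - 1) 0 = xs[mm] := by
          simpa using List.getD_eq_getElem xs 0 (by omega : mm < xs.length)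
        rw [hget]
        simp only [Nat.add_sub_cancel]
        rw [htake, List.append_assoc, List.singleton_append, List.cons_append]
      · -- the new 'previous' is xs[mm+1]
        have hidx : PySem.List.pyGet? (p :: (xs.take (mm + 1 - 1) ++ xs.drop (mm + 1))) ((mm + 1 : Nat) : Int)
            = (p :: (xs.take (mm + 1 - 1) ++ xs.drop (mm + 1)))[mm + 1]? := PySem.List.pyGet?_natCast _ (mm + 1)
        rw [hidx]
        have hsp : (p :: (xs.take (mm + 1 - 1) ++ xs.drop (mm + 1)))
            = (p :: xs.take (mm + 1 - 1)) ++ xs.drop (mm + 1) := by simp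
        rw [hsp, List.getElem?_append_right (by omega), hpre, Nat.sub_self, hdrop]
        simp

-- one full outer iteration on a nonempty list l of length n is a right rotation by one
theorem outer_step_eq (n : Int) (l : List Int) (i : Int) (h : l ≠ []) (hn : (l.length : Int) = n) :
    rotOuterStep n l i = (PySem.List.pyGet? l (-1)).getD 0 :: l.dropLast := by
  have hl : 1 ≤ l.length := List.length_pos_iff.mpr h
  unfold rotOuterStep
  rw [← hn, inner_inv l _ l.length hl le_rfl]
  simp [List.dropLast_eq_take, List.drop_length]

-- rotating a (length-t)-rotated list once more: from split point len-t to len-(t+1)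
theorem rotated_step (xs : List Int) (t : Nat) (h : t + 1 ≤ xs.length) :
    (PySem.List.pyGet? (xs.drop (xs.length - t) ++ xs.take (xs.length - t)) (-1)).getD 0
        :: (xs.drop (xs.length - t) ++ xs.take (xs.length - t)).dropLast
      = xs.drop (xs.length - (t + 1)) ++ xs.take (xs.length - (t + 1)) := by
  have hs1 : 1 ≤ xs.length - t := by omega
  have htne : xs.take (xs.length - t) ≠ [] := by
    have hlt : (xs.take (xs.length - t)).length = xs.length - t := by
      simp [List.length_take]
    intro hc; rw [hc] at hlt; simp at hlt; omega
  have hne : xs.drop (xs.length - t) ++ xs.take (xs.length - t) ≠ [] := by simp [htne]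
  rw [pyGet_neg_one _ hne, List.getLast?_append_of_ne_nil _ htne]
  have hidx : xs.length - t - 1 < xs.length := by omega
  have hlast : (xs.take (xs.length - t)).getLast? = some xs[xs.length - t - 1] := by
    rw [List.getLast?_eq_getElem?]
    have hlt : (xs.take (xs.length - t)).length = xs.length - t := by
      simp [List.length_take]
    rw [hlt, List.getElem?_take]
    rw [if_pos (by omega)]
    exact List.getElem?_eq_getElem hidx
  rw [hlast]
  have hdl : (xs.drop (xs.length - t) ++ xs.take (xs.length - t)).dropLast
      = xs.drop (xs.length - t) ++ xs.take (xs.length - t - 1) := by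
    rw [List.dropLast_append_of_ne_nil htne]
    congr 1
    rw [List.dropLast_eq_take, List.take_take]
    congr 1
    simp [List.length_take]
  rw [hdl]
  have hcons : xs.drop (xs.length - t - 1) = xs[xs.length - t - 1] :: xs.drop (xs.length - t) := by
    have hd := List.drop_eq_getElem_cons hidx
    have e2 : xs.length - t - 1 + 1 = xs.length - t := by omega
    rw [hd, e2]
  have e1 : xs.length - (t + 1) = xs.length - t - 1 := by omega
  rw [e1, hcons]
  simp

-- A's outer loop, run t ≤ |xs| times, rotates right by t
theorem outer_inv (xs : List Int) (hxs : xs ≠ []) (t : Nat) (ht : t ≤ xs.length) :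
    (PySem.List.pyRange 0 (t : Int) 1).foldl (rotOuterStep (xs.length : Int)) xs
      = xs.drop (xs.length - t) ++ xs.take (xs.length - t) := by
  induction t with
  | zero => simp [PySem.List.pyRange_one_eq_nil]
  | succ t ih =>
    have ht' : t ≤ xs.length := by omega
    have hsplit : PySem.List.pyRange 0 ((t : Int) + 1) 1
        = PySem.List.pyRange 0 (t : Int) 1 ++ [(t : Int)] :=
      PySem.List.pyRange_one_succ_right (Int.natCast_nonneg _)
    have hc : ((t + 1 : Nat) : Int) = (t : Int) + 1 := by push_cast; ring
    rw [hc, hsplit, List.foldl_append, ih ht']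
    have hl : 0 < xs.length := List.length_pos_iff.mpr hxs
    set cur := xs.drop (xs.length - t) ++ xs.take (xs.length - t) with hcur
    have hclen : cur.length = xs.length := by
      simp [hcur, List.length_take, List.length_drop]
    have hlcur : (cur.length : Int) = (xs.length : Int) := by exact_mod_cast hclen
    have hcne : cur ≠ [] := by
      intro hc'
      rw [hc'] at hclen
      simp at hclen
      omega
    simp only [List.foldl_cons, List.foldl_nil]
    rw [outer_step_eq _ cur _ hcne hlcur]
    exact rotated_step xs t (by omega)

-- ===== VERDICT (by name: the statement is the Claim_ definition above) =====
theorem rotate4_spec : Claim_equal_rotate4 := by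
  intro nums k _hdom hpre
  unfold Spec_rotate4 rotate4 rotate4_alt
  have hl : 0 < nums.length := List.length_pos_iff.mpr hpre
  have hn : (0 : Int) < (nums.length : Int) := by exact_mod_cast hl
  have hk0 : 0 ≤ PySem.Int.mod k (nums.length : Int) := PySem.Int.mod_nonneg k hn
  have hklt : PySem.Int.mod k (nums.length : Int) < (nums.length : Int) := PySem.Int.mod_lt k hn
  set k' := PySem.Int.mod k (nums.length : Int) with hk'
  have hkt : k' = ((k'.toNat : Nat) : Int) := (Int.toNat_of_nonneg hk0).symm
  have htle : k'.toNat ≤ nums.length := by omega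
  rw [PySem.List.slice_from nums (by omega : (0:Int) ≤ (nums.length : Int) - k'),
      PySem.List.slice_to nums (by omega : (0:Int) ≤ (nums.length : Int) - k'),
      hkt, outer_inv nums hpre k'.toNat htle]
  have he : ((nums.length : Int) - ((k'.toNat : Nat) : Int)).toNat = nums.length - k'.toNat := by omega
  rw [he]
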